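-- pv_equiv track=rewrite | github.com/zidan0x266/Ganesan-Group | tools/uta06/sub_associations.py | calcNode
-- ===== SOURCE A (Python) =====
-- def calcNode(ASSOac):
--     asso_connections = set()
--     asso_activated = set()
--     for i in range(len(ASSOac)):
--         atom1, atom2 = ASSOac[i]
--         asso_connections.add(tuple(sorted((atom1, atom2))))
--         asso_activated.add(atom1)
--         asso_activated.add(atom2)
--     return asso_activated, asso_connections
-- ===== SOURCE B (Python) =====
-- def calcNode(ASSOac):
--     n = len(ASSOac)
--     if n == 0:
--         return set(), set()
--     if n == 1:
--         atom1, atom2 = ASSOac[0]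
--         conn = (atom1, atom2) if atom1 <= atom2 else (atom2, atom1)
--         return {atom1, atom2}, {conn}
--     mid = n // 2
--     left_act, left_conn = calcNode(ASSOac[:mid])
--     right_act, right_conn = calcNode(ASSOac[mid:])
--     return left_act | right_act, left_conn | right_conn
-- ===== Notes on version B (the rewrite author's own statement) =====
-- stated objective: alternative
-- what changed: Replaces the single index loop that mutates two accumulator sets with a divide-and-conquer recursion: split the pair list in half, recurse on each half, and combine the two results with set unions.
import Mathlib
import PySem

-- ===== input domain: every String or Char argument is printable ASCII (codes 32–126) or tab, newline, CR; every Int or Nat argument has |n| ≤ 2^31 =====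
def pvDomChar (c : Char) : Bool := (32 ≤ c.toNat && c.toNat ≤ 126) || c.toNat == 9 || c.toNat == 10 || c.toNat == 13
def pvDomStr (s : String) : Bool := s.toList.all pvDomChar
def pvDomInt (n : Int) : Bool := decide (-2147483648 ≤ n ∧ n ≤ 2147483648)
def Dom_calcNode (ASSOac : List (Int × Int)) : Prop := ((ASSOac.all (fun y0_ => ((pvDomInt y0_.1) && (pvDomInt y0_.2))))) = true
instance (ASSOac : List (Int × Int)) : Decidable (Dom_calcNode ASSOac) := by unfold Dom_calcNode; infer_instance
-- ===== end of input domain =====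

-- B replaces A's single index loop that mutates two accumulator sets by a
-- divide-and-conquer recursion (split in half, recurse, combine by set union) —
-- an alternative decomposition of the same cost class, not claimed faster.


-- ===== PORT A =====
-- for i in range(len(ASSOac)): unpack ASSOac[i]; the loop visits exactly the list's
-- elements in order, ported as a fold over the list carrying both sets as the state.
def calcNode (ASSOac : List (Int × Int)) : List Int × (List (Int × Int)) :=
  let st := ASSOac.foldl
    (fun (st : PySem.Set Int × PySem.Set (Int × Int)) p =>
      -- tuple(sorted((atom1, atom2)))
      let conn := if p.1 ≤ p.2 then (p.1, p.2) else (p.2, p.1)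
      (PySem.Set.add (PySem.Set.add st.1 p.1) p.2, PySem.Set.add st.2 conn))
    (PySem.Set.empty, PySem.Set.empty)
  (st.1, st.2)

-- ===== PORT B =====
-- divide and conquer: ASSOac[:mid] / ASSOac[mid:] with 0 ≤ mid ≤ len are exactly
-- List.take mid / List.drop mid (PySem slice_to / slice_from).
def calcNode_alt (ASSOac : List (Int × Int)) : List Int × (List (Int × Int)) :=
  match ASSOac with
  | [] => (PySem.Set.empty, PySem.Set.empty)
  | [p] =>
      -- (atom1, atom2) if atom1 <= atom2 else (atom2, atom1)
      let conn := if p.1 ≤ p.2 then (p.1, p.2) else (p.2, p.1)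
      (PySem.Set.add (PySem.Set.add PySem.Set.empty p.1) p.2,
       PySem.Set.add PySem.Set.empty conn)
  | a :: b :: t =>
      let mid := (a :: b :: t).length / 2
      let lres := calcNode_alt ((a :: b :: t).take mid)
      let rres := calcNode_alt ((a :: b :: t).drop mid)
      (PySem.Set.union lres.1 rres.1, PySem.Set.union lres.2 rres.2)
termination_by ASSOac.length
decreasing_by
  · simp [List.length_take]; omega
  · simp [List.length_drop]; omega

-- ===== PRECONDITION & SPEC =====
def Spec_calcNode (ASSOac : List (Int × Int)) (out : List Int × (List (Int × Int))) : Prop := out = calcNode_alt ASSOac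
instance (ASSOac : List (Int × Int)) (out : List Int × (List (Int × Int))) : Decidable (Spec_calcNode ASSOac out) := by unfold Spec_calcNode; infer_instance

-- ===== CLAIM (what is proved, stated in full; the proofs are below) =====
def Claim_equal_calcNode : Prop := ∀ (ASSOac : List (Int × Int)), Dom_calcNode ASSOac → Spec_calcNode ASSOac (calcNode ASSOac)

-- ===== LEMMAS AND PROOFS =====

-- membership in a fold of Set.add
theorem mem_setUpdate {α : Type} [BEq α] [LawfulBEq α] (t : List α) (s : PySem.Set α) (x : α) :
    x ∈ PySem.Set.update s t ↔ x ∈ s ∨ x ∈ t := by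
  induction t generalizing s with
  | nil => simp [PySem.Set.update]
  | cons h tl ih =>
    simp only [PySem.Set.update, List.foldl_cons] at *
    rw [ih]
    simp [PySem.Set.mem_add]
    tauto

-- Set.update absorbs a Set.add on its second argument
theorem update_add {α : Type} [BEq α] [LawfulBEq α] (s r : PySem.Set α) (y : α) :
    PySem.Set.update s (PySem.Set.add r y) = PySem.Set.add (PySem.Set.update s r) y := by
  by_cases hy : y ∈ r
  · have h1 : PySem.Set.add r y = r := by
      simp [PySem.Set.add, PySem.Set.contains, hy]
    have h2 : y ∈ PySem.Set.update s r := (mem_setUpdate r s y).2 (Or.inr hy)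
    have h3 : PySem.Set.add (PySem.Set.update s r) y = PySem.Set.update s r := by
      simp [PySem.Set.add, PySem.Set.contains, h2]
    rw [h1, h3]
  · have h1 : PySem.Set.add r y = r ++ [y] := by
      simp [PySem.Set.add, PySem.Set.contains, hy]
    rw [h1]
    simp [PySem.Set.update, List.foldl_append]

-- updating by an already-deduplicated list equals updating by the raw list
theorem update_foldl {α : Type} [BEq α] [LawfulBEq α] (t : List α) (s r : PySem.Set α) :
    PySem.Set.update s (List.foldl PySem.Set.add r t)
      = PySem.Set.update (PySem.Set.update s r) t := by
  induction t generalizing r with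
  | nil => rfl
  | cons h tl ih =>
    simp only [List.foldl_cons]
    rw [ih (PySem.Set.add r h)]
    have : PySem.Set.update s (PySem.Set.add r h) = PySem.Set.add (PySem.Set.update s r) h :=
      update_add s r h
    simp only [PySem.Set.update] at *
    rw [this]
    rfl

-- union of two set(…)s is set of the concatenation
theorem union_ofList {α : Type} [BEq α] [LawfulBEq α] (u v : List α) :
    PySem.Set.union (PySem.Set.ofList u) (PySem.Set.ofList v)
      = PySem.Set.ofList (u ++ v) := by
  show PySem.Set.update (PySem.Set.ofList u) (PySem.Set.ofList v) = _
  have h := update_foldl v (PySem.Set.ofList u) PySem.Set.empty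
  simp only [PySem.Set.ofList_eq_foldl, PySem.Set.empty] at h ⊢
  rw [h]
  simp [PySem.Set.update, List.foldl_append]

-- adding a pair's two components one after the other is folding add over [p.1, p.2]
theorem foldl_add_pair (l : List (Int × Int)) (s : PySem.Set Int) :
    l.foldl (fun (s : PySem.Set Int) p => PySem.Set.add (PySem.Set.add s p.1) p.2) s
      = (l.flatMap (fun p => [p.1, p.2])).foldl PySem.Set.add s := by
  induction l generalizing s with
  | nil => rfl
  | cons h t ih => simp [List.foldl_cons, ih]

-- the canonically ordered connection of a pair
def connOf (p : Int × Int) : Int × Int := if p.1 ≤ p.2 then (p.1, p.2) else (p.2, p.1)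

-- closed form of port A: set of all endpoints, set of all sorted pairs
theorem calcNode_closed (l : List (Int × Int)) :
    calcNode l = (PySem.Set.ofList (l.flatMap (fun p => [p.1, p.2])),
                  PySem.Set.ofList (l.map connOf)) := by
  unfold calcNode
  rw [PySem.List.foldl_prod_mk
    (f := fun (s : PySem.Set Int) (p : Int × Int) => PySem.Set.add (PySem.Set.add s p.1) p.2)
    (g := fun (s : PySem.Set (Int × Int)) (p : Int × Int) =>
      PySem.Set.add s (if p.1 ≤ p.2 then (p.1, p.2) else (p.2, p.1)))]
  refine Prod.ext ?_ ?_
  · simp [foldl_add_pair, PySem.Set.ofList_eq_foldl, PySem.Set.empty]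
  · simp [connOf, PySem.Set.ofList_eq_foldl, List.foldl_map, PySem.Set.empty]

-- closed form of port B, by the divide-and-conquer recursion
theorem calcNode_alt_closed (l : List (Int × Int)) :
    calcNode_alt l = (PySem.Set.ofList (l.flatMap (fun p => [p.1, p.2])),
                      PySem.Set.ofList (l.map connOf)) := by
  fun_induction calcNode_alt l with
  | case1 => rfl
  | case2 p => rfl
  | case3 a b t mid lres rres ih1 ih2 =>
    simp only [lres, rres]
    rw [ih1, ih2]
    refine Prod.ext ?_ ?_
    · show PySem.Set.union _ _ = _
      rw [union_ofList, ← List.flatMap_append, List.take_append_drop]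
    · show PySem.Set.union _ _ = _
      rw [union_ofList, ← List.map_append, List.take_append_drop]

-- ===== VERDICT (by name: the statement is the Claim_ definition above) =====
theorem calcNode_spec : Claim_equal_calcNode := by
  intro ASSOac _
  unfold Spec_calcNode
  rw [calcNode_closed, calcNode_alt_closed]
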